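-- pv_equiv track=rewrite | github.com/int-brain-lab/ibllib | python/alf/scraper.py | paths_between
-- ===== SOURCE A (Python) =====
-- def paths_between(path_list, interval=[None, None]):
--     path_list = sorted(path_list)
--     if not all(interval):
--         return path_list
--     if interval[0] is None:
--         interval[0] = path_list[0]
--     if interval[1] is None:
--         interval[1] = path_list[-1]
--     idxs = [i for i, x in enumerate(path_list)
--             if interval[0] in x or interval[1] in x]
--     start = min(idxs)
--     stop = max(idxs)
--
--     return path_list[start:stop]
-- ===== SOURCE B (Python) =====
-- def paths_between(path_list, interval=[None, None]):
--     paths = sorted(path_list)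
--     if not all(interval):
--         return paths
--     lo, hi = interval[0], interval[1]
--
--     def hits(p):
--         return lo in p or hi in p
--
--     n = len(paths)
--     first = 0
--     while first < n and not hits(paths[first]):
--         first += 1
--     if first == n:
--         raise ValueError("no path matches the interval endpoints")
--     last = n - 1
--     while not hits(paths[last]):
--         last -= 1
--     return paths[first:last]
-- ===== Notes on version B (the rewrite author's own statement) =====
-- stated objective: alternative
-- what changed: Replaces A's build-a-full-index-list then min()/max() passes by two direction-specific pointer scans (forward for the first match, backward for the last), slicing directly with the two indices.
import Mathlib
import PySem

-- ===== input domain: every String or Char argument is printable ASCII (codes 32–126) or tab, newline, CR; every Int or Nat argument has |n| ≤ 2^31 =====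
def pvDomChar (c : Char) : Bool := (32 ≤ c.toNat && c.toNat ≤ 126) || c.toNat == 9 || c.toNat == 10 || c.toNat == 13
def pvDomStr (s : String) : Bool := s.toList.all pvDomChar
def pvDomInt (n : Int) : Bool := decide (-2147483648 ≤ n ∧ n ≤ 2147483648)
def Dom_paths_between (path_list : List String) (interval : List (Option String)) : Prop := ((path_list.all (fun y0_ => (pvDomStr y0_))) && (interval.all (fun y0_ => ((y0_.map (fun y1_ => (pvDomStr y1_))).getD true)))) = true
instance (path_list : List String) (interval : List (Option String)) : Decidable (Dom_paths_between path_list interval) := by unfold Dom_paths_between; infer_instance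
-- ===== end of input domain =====

-- B replaces A's full index-list + min()/max() passes by a forward scan for the first match
-- and a backward scan for the last match (alternative decomposition; same return values).


-- ===== PORT A =====
def paths_between (path_list : List String) (interval : List (Option String)) : List String :=
  let pl := PySem.List.sorted path_list (fun x => x) false
  if !(interval.all (fun o => o.getD "" != "")) then pl
  else
    match PySem.List.pyGet? interval 0, PySem.List.pyGet? interval 1 with
    | some o0, some o1 =>
      -- the two 'if interval[k] is None' rebindings (dead under all(interval)):
      let i0 := match o0 with | none => pl.headD "" | some s => s
      let i1 := match o1 with | none => pl.getLastD "" | some s => s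
      let idxs := (PySem.List.enumerate pl 0).filterMap
        (fun q => if PySem.Str.isIn i0 q.2 || PySem.Str.isIn i1 q.2 then some q.1 else none)
      match PySem.List.min? idxs (fun x => x), PySem.List.max? idxs (fun x => x) with
      | some start, some stop => PySem.List.slice pl (some start) (some stop)
      | _, _ => []        -- min()/max() of empty raises ValueError: outside Pre_
    | _, _ => []           -- interval[0]/interval[1] raises IndexError: outside Pre_

-- ===== PORT B =====
-- forward while-loop: index of the first element satisfying p
def pbScanF (p : String → Bool) : List String → Option Nat
  | [] => none
  | x :: xs => if p x then some 0 else (pbScanF p xs).map (· + 1)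

-- backward while-loop: index of the last element satisfying p
def pbScanB (p : String → Bool) : List String → Option Nat
  | [] => none
  | x :: xs =>
    match pbScanB p xs with
    | some j => some (j + 1)
    | none => if p x then some 0 else none

def paths_between_alt (path_list : List String) (interval : List (Option String)) : List String :=
  let paths := PySem.List.sorted path_list (fun x => x) false
  if !(interval.all (fun o => o.getD "" != "")) then paths
  else
    match interval with
    | o0 :: o1 :: _ =>
      let lo := o0.getD ""
      let hi := o1.getD ""
      let hits := fun s => PySem.Str.isIn lo s || PySem.Str.isIn hi s
      match pbScanF hits paths with
      | none => []          -- raise ValueError: outside Pre_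
      | some first =>
        let last := (pbScanB hits paths).getD 0
        (paths.drop first).take (last - first)
    | _ => []               -- interval shorter than 2: outside Pre_

-- ===== PRECONDITION & SPEC =====
-- Pre_ excludes exactly the inputs where A raises: an interval of truthy entries but length < 2
-- (IndexError), or one whose endpoints match no path (ValueError on min of an empty list).
def Pre_paths_between (path_list : List String) (interval : List (Option String)) : Prop :=
  interval.all (fun o => o.getD "" != "") = true →
    2 ≤ interval.length ∧
    ∃ x ∈ path_list,
      (PySem.Str.isIn ((interval[0]?.getD none).getD "") x
        || PySem.Str.isIn ((interval[1]?.getD none).getD "") x) = true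
instance (path_list : List String) (interval : List (Option String)) : Decidable (Pre_paths_between path_list interval) := by unfold Pre_paths_between; infer_instance
def pvWitness_paths_between : List String × List (Option String) :=
  (["b/1", "a/2"], [some "a", some "b"])

def Spec_paths_between (path_list : List String) (interval : List (Option String)) (out : List String) : Prop := out = paths_between_alt path_list interval
instance (path_list : List String) (interval : List (Option String)) (out : List String) : Decidable (Spec_paths_between path_list interval out) := by unfold Spec_paths_between; infer_instance

-- ===== CLAIM (what is proved, stated in full; the proofs are below) =====
def Claim_equal_paths_between : Prop := ∀ (path_list : List String) (interval : List (Option String)), Dom_paths_between path_list interval → Pre_paths_between path_list interval → Spec_paths_between path_list interval (paths_between path_list interval)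

-- ===== LEMMAS AND PROOFS =====

-- A's index-list comprehension, as a function of the enumerate start
def pbIdxs (p : String → Bool) (xs : List String) (s : Int) : List Int :=
  (PySem.List.enumerate xs s).filterMap (fun q => if p q.2 then some q.1 else none)

theorem pbIdxs_nil (p : String → Bool) (s : Int) : pbIdxs p [] s = [] := rfl

theorem pbIdxs_cons (p : String → Bool) (x : String) (xs : List String) (s : Int) :
    pbIdxs p (x :: xs) s = if p x then s :: pbIdxs p xs (s + 1) else pbIdxs p xs (s + 1) := by
  by_cases hp : p x <;>
    simp [pbIdxs, PySem.List.enumerate_cons, hp]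

theorem mem_pbIdxs_le (p : String → Bool) (xs : List String) (s : Int) :
    ∀ j ∈ pbIdxs p xs s, s ≤ j := by
  induction xs generalizing s with
  | nil => simp [pbIdxs_nil]
  | cons x xs ih =>
    intro j hj
    rw [pbIdxs_cons] at hj
    split at hj
    · rcases List.mem_cons.1 hj with h | h
      · omega
      · have := ih (s + 1) j h; omega
    · have := ih (s + 1) j hj; omega

theorem foldl_min_of_le (t : List Int) (x : Int) (h : ∀ y ∈ t, x ≤ y) :
    t.foldl min x = x := by
  induction t generalizing x with
  | nil => rfl
  | cons a t ih =>
    simp only [List.foldl_cons]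
    rw [min_eq_left (h a (by simp))]
    exact ih x (fun y hy => h y (by simp [hy]))

theorem min?_cons_of_le (x : Int) (t : List Int) (h : ∀ y ∈ t, x ≤ y) :
    PySem.List.min? (x :: t) (fun y => y) = some x := by
  rw [PySem.List.min?_id_cons, foldl_min_of_le t x h]

theorem foldl_max_assoc (t : List Int) (a b : Int) :
    t.foldl max (max a b) = max a (t.foldl max b) := by
  induction t generalizing b with
  | nil => rfl
  | cons c t ih => simp only [List.foldl_cons, max_assoc]; exact ih (max b c)

theorem max?_cons_of_le (x : Int) (t : List Int) (m : Int)
    (hm : PySem.List.max? t (fun y => y) = some m) (hx : x ≤ m) :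
    PySem.List.max? (x :: t) (fun y => y) = some m := by
  cases t with
  | nil => simp [PySem.List.max?] at hm
  | cons h t' =>
    rw [PySem.List.max?_id_cons] at hm ⊢
    have hm' : t'.foldl max h = m := by injection hm
    rw [List.foldl_cons, foldl_max_assoc, hm', max_eq_right hx]

theorem min?_pbIdxs (p : String → Bool) (xs : List String) (s : Int) :
    PySem.List.min? (pbIdxs p xs s) (fun y => y)
      = (pbScanF p xs).map (fun k => s + (k : Int)) := by
  induction xs generalizing s with
  | nil => simp [pbIdxs_nil, pbScanF, PySem.List.min?]
  | cons x xs ih =>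
    rw [pbIdxs_cons]
    by_cases hp : p x
    · rw [if_pos hp]
      rw [min?_cons_of_le s _ (fun y hy => le_trans (by omega) (mem_pbIdxs_le p xs (s + 1) y hy))]
      simp [pbScanF, hp]
    · rw [if_neg hp, ih (s + 1)]
      simp only [pbScanF, hp, if_neg, Bool.false_eq_true, not_false_eq_true]
      cases pbScanF p xs
      · simp
      · simp; omega

theorem pbScanB_none_iff (p : String → Bool) (xs : List String) :
    pbScanB p xs = none ↔ ∀ x ∈ xs, p x = false := by
  induction xs with
  | nil => simp [pbScanB]
  | cons x xs ih =>
    simp only [pbScanB, List.forall_mem_cons]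
    cases h : pbScanB p xs with
    | some j => simp [← ih, h]
    | none =>
      have hxs := ih.1 h
      by_cases hp : p x
      · simp [hp]
      · simp [hp]
        exact fun y hy => hxs y hy

theorem pbIdxs_eq_nil (p : String → Bool) (xs : List String) :
    ∀ (s : Int), (∀ x ∈ xs, p x = false) → pbIdxs p xs s = [] := by
  induction xs with
  | nil => intro s _; exact pbIdxs_nil p s
  | cons x xs ih =>
    intro s h
    rw [pbIdxs_cons, if_neg (by simp [h x (by simp)])]
    exact ih (s + 1) (fun y hy => h y (by simp [hy]))

theorem max?_pbIdxs (p : String → Bool) (xs : List String) (s : Int) :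
    PySem.List.max? (pbIdxs p xs s) (fun y => y)
      = (pbScanB p xs).map (fun k => s + (k : Int)) := by
  induction xs generalizing s with
  | nil => simp [pbIdxs_nil, pbScanB, PySem.List.max?]
  | cons x xs ih =>
    rw [pbIdxs_cons]
    cases h : pbScanB p xs with
    | some j =>
      have hrec : PySem.List.max? (pbIdxs p xs (s + 1)) (fun y => y) = some (s + 1 + (j : Int)) := by
        rw [ih (s + 1), h]; rfl
      by_cases hp : p x
      · rw [if_pos hp, max?_cons_of_le s _ _ hrec (by omega)]
        simp [pbScanB, h]; omega
      · rw [if_neg hp, hrec]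
        simp [pbScanB, h]; omega
    | none =>
      have hnil : pbIdxs p xs (s + 1) = [] :=
        pbIdxs_eq_nil p xs (s + 1) ((pbScanB_none_iff p xs).1 h)
      by_cases hp : p x
      · rw [if_pos hp, hnil]
        simp [pbScanB, h, hp, PySem.List.max?_id_cons]
      · rw [if_neg hp, hnil]
        simp [pbScanB, h, hp, PySem.List.max?]

theorem pbScanF_none_iff (p : String → Bool) (xs : List String) :
    pbScanF p xs = none ↔ ∀ x ∈ xs, p x = false := by
  induction xs with
  | nil => simp [pbScanF]
  | cons x xs ih =>
    by_cases hp : p x <;> simp [pbScanF, hp, ih]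

theorem paths_between_spec : Claim_equal_paths_between := by
  intro path_list interval _ hpre
  unfold Spec_paths_between paths_between paths_between_alt
  simp only
  by_cases hall : interval.all (fun o => o.getD "" != "") = true
  · rw [if_neg (by simp [hall])]
    obtain ⟨hlen, x, hx, hmatch⟩ := hpre hall
    match interval, hlen with
    | o0 :: o1 :: rest, _ =>
      have hg0 : PySem.List.pyGet? (o0 :: o1 :: rest) 0 = some o0 := by
        simp [PySem.List.pyGet?, PySem.List.pyIdx?]
        rw [if_pos (by positivity)]
        rfl
      have hg1 : PySem.List.pyGet? (o0 :: o1 :: rest) 1 = some o1 := by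
        simp [PySem.List.pyGet?, PySem.List.pyIdx?]
      rw [hg0, hg1]
      have hall' := hall
      simp only [List.all_cons, Bool.and_eq_true, bne_iff_ne, ne_eq] at hall
      obtain ⟨h0, h1, _⟩ := hall
      cases o0 with
      | none => simp at h0
      | some s0 =>
      cases o1 with
      | none => simp at h1
      | some s1 =>
      simp only [Option.getD_some]
      set paths := PySem.List.sorted path_list (fun x => x) false with hpaths
      set p : String → Bool := fun s => PySem.Str.isIn s0 s || PySem.Str.isIn s1 s with hhits
      have hxp : x ∈ paths := (PySem.List.mem_sorted path_list (fun x => x) false x).2 hx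
      have hmem : ∃ y ∈ paths, p y = true := by
        refine ⟨x, hxp, ?_⟩
        simpa [hhits] using hmatch
      have hF : pbScanF p paths ≠ none := by
        intro hc
        obtain ⟨y, hy, hpy⟩ := hmem
        have := (pbScanF_none_iff p paths).1 hc y hy
        simp [hpy] at this
      have hB : pbScanB p paths ≠ none := by
        intro hc
        obtain ⟨y, hy, hpy⟩ := hmem
        have := (pbScanB_none_iff p paths).1 hc y hy
        simp [hpy] at this
      obtain ⟨k1, hk1⟩ := Option.ne_none_iff_exists'.1 hF
      obtain ⟨k2, hk2⟩ := Option.ne_none_iff_exists'.1 hB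
      have hidxs : (PySem.List.enumerate paths 0).filterMap
          (fun q => if PySem.Str.isIn s0 q.2 || PySem.Str.isIn s1 q.2 then some q.1 else none)
          = pbIdxs p paths 0 := rfl
      rw [hidxs, min?_pbIdxs, max?_pbIdxs, hk1, hk2]
      rw [if_neg (by simp [hall'])]
      simp [PySem.List.slice_natCast]
    | _ :: [], h => simp at h
    | [], h => simp at h
  · rw [if_pos (by simp [hall]), if_pos (by simp [hall])]
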